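/- GENERATED by farm/mkstatement.py from design/units.tsv (unit `vorbis_decode_packet_rest.8`) and the assertions of Vorbis/Spec/PacketRest.lean — do not edit.
   THE STATEMENT of the proof unit `vorbis_decode_packet_rest.8`: segment 8 of `vorbis_decode_packet_rest` (51 instructions; entries 0x111457;
   exits 0x111559; ranges 0x111457-0x111554)
   takes each of its entry assertions to one of its exit assertions (`Vorbis.Spec.vorbis_decode_packet_rest.Seg8`), given the contracts of its callees.
   What the names mean: Vorbis/Spec/Basic.lean (the shared hypotheses), Vorbis/Spec/PacketRest.lean (the assertions). The theorem to prove: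
   `theorem vorbis_decode_packet_rest_8_ok : Vorbis.Spec.vorbis_decode_packet_rest_8.Statement`. -/
import Vorbis.Spec.Libc
import Vorbis.Spec.PacketRest
namespace Vorbis.Spec.vorbis_decode_packet_rest_8
open X86 X86.User Asan

/-- The statement of unit `vorbis_decode_packet_rest.8`. -/
def Statement : Prop :=
  ∀ (Lay : Layout) (_hLay : Lay.hi = 0x1000000) (μ : Microarch) (_hμ : UserX.MicroOK μ) (u₀ : State)
    (_hcode : HasCodeNat Lay u₀ Vorbis.L.vorbis_decode_packet_rest.entry Vorbis.Code.code_vorbis_decode_packet_rest.nat Vorbis.L.vorbis_decode_packet_rest.size)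
    (_h_memcpy : ∀ (others : List Obj) (frames : List (Nat × FrameLayout)), Calls Lay μ Vorbis.WayInv (Vorbis.conv u₀) Vorbis.L.memcpy.entry (Vorbis.Spec.memcpy.spec others frames))
    (_h_asan_load1_noabort : Asan.SmallCheck Lay μ Vorbis.WayInv (Vorbis.CodeOK u₀) [.rax, .rdx] 1 Vorbis.L.__asan_load1_noabort.entry)
    (_h_asan_store4_noabort : Asan.SmallCheck Lay μ Vorbis.WayInv (Vorbis.CodeOK u₀) [.rax, .rcx, .rdx] 4 Vorbis.L.__asan_store4_noabort.entry)
    (_h_asan_load2_noabort : Asan.SmallCheck Lay μ Vorbis.WayInv (Vorbis.CodeOK u₀) [.rax, .rcx, .rdx] 2 Vorbis.L.__asan_load2_noabort.entry)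
    (_h_asan_load8_noabort : Asan.SmallCheck Lay μ Vorbis.WayInv (Vorbis.CodeOK u₀) [.rax, .rcx, .rdx] 8 Vorbis.L.__asan_load8_noabort.entry)
    (_h_asan_load4_noabort : Asan.SmallCheck Lay μ Vorbis.WayInv (Vorbis.CodeOK u₀) [.rax, .rcx, .rdx] 4 Vorbis.L.__asan_load4_noabort.entry),
    Vorbis.Spec.vorbis_decode_packet_rest.Seg8 Lay μ u₀

end Vorbis.Spec.vorbis_decode_packet_rest_8
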